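-- pv_equiv track=rewrite | github.com/alanhewenyu/ValueScope | modeling/ai_analyst.py | _collect_top_links
-- ===== SOURCE A (Python) =====
-- def _collect_top_links(all_results, max_links=3):
--     """Collect unique top links from search results for scraping."""
--     seen = set()
--     links = []
--     for i in sorted(all_results.keys()):
--         for r in all_results[i]:
--             link = r.get("link", "")
--             if link and link not in seen and not link.endswith(".pdf"):
--                 seen.add(link)
--                 links.append(link)
--                 if len(links) >= max_links:
--                     return links
--     return links
-- ===== SOURCE B (Python) =====
-- def _collect_top_links(all_results, max_links=3):
--     """Collect unique top links: map each acceptable link to its first-occurrence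
--     index (reverse-overwrite trick), then sort the links by that index and slice."""
--     stream = [r.get("link", "") for i in sorted(all_results) for r in all_results[i]]
--     first = {}
--     for idx, link in reversed(list(enumerate(stream))):
--         if link and not link.endswith(".pdf"):
--             first[link] = idx
--     ordered = sorted(first, key=lambda link: first[link])
--     k = max_links if max_links > 0 else 0
--     return ordered[:k]
-- ===== Notes on version B (the rewrite author's own statement) =====
-- stated objective: alternative
-- what changed: Removed the running seen-set and the guarded early-exit nested loop entirely: B maps every acceptable link to its first-occurrence index in the flattened stream (by assigning indices in reverse so the earliest wins), then SORTS the distinct links by that index and slices the first max_links, so uniqueness and ordering come from an index map and a sort instead of an online dedup scan.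
-- intended difference: On inputs with max_links <= 0 that contain at least one truthy non-.pdf link, A's post-append length check still returns a one-element list with the first such link, while B returns []; returning no more links than were requested is the intended behaviour. — e.g. on _collect_top_links([(0, [[("link", "a")]])], 0): A returns ["a"], B returns []
import Mathlib
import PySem

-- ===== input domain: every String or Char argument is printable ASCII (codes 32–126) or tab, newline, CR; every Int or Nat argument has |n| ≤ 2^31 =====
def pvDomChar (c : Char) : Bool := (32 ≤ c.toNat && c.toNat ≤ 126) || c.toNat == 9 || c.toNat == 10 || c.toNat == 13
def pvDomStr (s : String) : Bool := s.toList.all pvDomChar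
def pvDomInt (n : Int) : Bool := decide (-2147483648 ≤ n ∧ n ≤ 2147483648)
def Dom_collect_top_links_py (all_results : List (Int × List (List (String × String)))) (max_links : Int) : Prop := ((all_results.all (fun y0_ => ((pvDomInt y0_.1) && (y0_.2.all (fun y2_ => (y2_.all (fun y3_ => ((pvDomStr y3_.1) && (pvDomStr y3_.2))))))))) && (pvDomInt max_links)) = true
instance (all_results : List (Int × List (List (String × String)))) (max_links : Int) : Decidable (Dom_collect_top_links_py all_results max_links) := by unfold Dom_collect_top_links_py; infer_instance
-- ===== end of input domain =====

-- B drops A's running seen-set and early-exit nested loop: it maps every acceptable link to its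
-- first-occurrence index in the flattened stream (assigning in reverse so the earliest index wins),
-- sorts the distinct links by that index and slices; equal outside D_ (max_links ≤ 0 with a link present).

-- ===== PORT A =====
-- inner 'for r in all_results[i]' loop; Sum.inr models the early 'return links'
def pvA_inner (max_links : Int) (rows : List (List (String × String)))
    (seen : PySem.Set String) (links : List String) :
    Sum (PySem.Set String × List String) (List String) :=
  match rows with
  | [] => Sum.inl (seen, links)
  | r :: rest =>
    let link := (PySem.Dict.mk r).getD "link" ""
    if link ≠ "" ∧ PySem.Set.contains seen link = false ∧ PySem.Str.endswith link ".pdf" = false then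
      let seen2 := PySem.Set.add seen link
      let links2 := links ++ [link]
      if max_links ≤ (links2.length : Int) then Sum.inr links2
      else pvA_inner max_links rest seen2 links2
    else pvA_inner max_links rest seen links

-- outer 'for i in sorted(all_results.keys())' loop
def pvA_outer (max_links : Int) (d : PySem.Dict Int (List (List (String × String))))
    (keys : List Int) (seen : PySem.Set String) (links : List String) : List String :=
  match keys with
  | [] => links
  | i :: rest =>
    match pvA_inner max_links (d.getD i []) seen links with
    | Sum.inr res => res
    | Sum.inl (s, l) => pvA_outer max_links d rest s l

def collect_top_links_py (all_results : List (Int × List (List (String × String)))) (max_links : Int) : List String :=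
  let d := PySem.Dict.mk all_results
  pvA_outer max_links d (PySem.List.sorted d.keys (fun x => x) false) PySem.Set.empty []

-- ===== PORT B =====
def collect_top_links_py_alt (all_results : List (Int × List (List (String × String)))) (max_links : Int) : List String :=
  let d := PySem.Dict.mk all_results
  -- stream = [r.get("link","") for i in sorted(all_results) for r in all_results[i]]
  let stream := (PySem.List.sorted d.keys (fun x => x) false).flatMap
      (fun i => (d.getD i []).map (fun r => (PySem.Dict.mk r).getD "link" ""))
  -- for idx, link in reversed(list(enumerate(stream))): if link and not link.endswith(".pdf"): first[link] = idx
  let first := ((PySem.List.enumerate stream).reverse).foldl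
      (fun f (p : Int × String) =>
        if p.2 ≠ "" ∧ PySem.Str.endswith p.2 ".pdf" = false then f.insert p.2 p.1 else f)
      (PySem.Dict.empty : PySem.Dict String Int)
  -- ordered = sorted(first, key=lambda link: first[link]); every key is present, so the
  -- KeyError branch of first[link] is unreachable and get?'s default 0 is never taken
  let ordered := PySem.List.sorted first.keys (fun link => (first.get? link).getD 0) false
  -- k = max_links if max_links > 0 else 0; return ordered[:k]
  let k := if 0 < max_links then max_links else 0
  PySem.List.slice ordered none (some k)

-- ===== PRECONDITION & SPEC =====
-- On inputs with max_links ≤ 0 that contain at least one truthy non-.pdf link, A's post-append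
-- length check still returns a one-element list with the first such link, while B returns [];
-- returning no more links than were requested is the intended behaviour.
def D_collect_top_links_py (all_results : List (Int × List (List (String × String)))) (max_links : Int) : Prop :=
  max_links ≤ 0 ∧
  ∃ p ∈ all_results, ∃ r ∈ (all_results.lookup p.1).getD [], ∃ l,
    r.lookup "link" = some l ∧ l ≠ "" ∧ ¬ ".pdf".toList <:+ l.toList
instance (all_results : List (Int × List (List (String × String)))) (max_links : Int) : Decidable (D_collect_top_links_py all_results max_links) := by unfold D_collect_top_links_py; infer_instance

def Spec_collect_top_links_py (all_results : List (Int × List (List (String × String)))) (max_links : Int) (out : List String) : Prop := ¬ D_collect_top_links_py all_results max_links → out = collect_top_links_py_alt all_results max_links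
instance (all_results : List (Int × List (List (String × String)))) (max_links : Int) (out : List String) : Decidable (Spec_collect_top_links_py all_results max_links out) := by unfold Spec_collect_top_links_py; infer_instance

def pvDiffWitness_collect_top_links_py : (List (Int × List (List (String × String)))) × Int :=
  ([(0, [[("link", "a")]])], 0)
def pvDiffWitnessOut_collect_top_links_py : (List String) × (List String) := (["a"], [])

-- ===== CLAIM (what is proved, stated in full; the proofs are below) =====
def Claim_unchanged_collect_top_links_py : Prop := ∀ (all_results : List (Int × List (List (String × String)))) (max_links : Int), Dom_collect_top_links_py all_results max_links → Spec_collect_top_links_py all_results max_links (collect_top_links_py all_results max_links)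
def Claim_changed_collect_top_links_py : Prop := Dom_collect_top_links_py (pvDiffWitness_collect_top_links_py.1) (pvDiffWitness_collect_top_links_py.2) ∧ D_collect_top_links_py (pvDiffWitness_collect_top_links_py.1) (pvDiffWitness_collect_top_links_py.2) ∧ collect_top_links_py (pvDiffWitness_collect_top_links_py.1) (pvDiffWitness_collect_top_links_py.2) = pvDiffWitnessOut_collect_top_links_py.1 ∧ collect_top_links_py_alt (pvDiffWitness_collect_top_links_py.1) (pvDiffWitness_collect_top_links_py.2) = pvDiffWitnessOut_collect_top_links_py.2 ∧ pvDiffWitnessOut_collect_top_links_py.1 ≠ pvDiffWitnessOut_collect_top_links_py.2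

def Claim_exact_collect_top_links_py : Prop := ∀ (all_results : List (Int × List (List (String × String)))) (max_links : Int), Dom_collect_top_links_py all_results max_links → D_collect_top_links_py all_results max_links → collect_top_links_py all_results max_links ≠ collect_top_links_py_alt all_results max_links

-- ===== LEMMAS AND PROOFS =====

-- the candidate-link predicate of both programs
def pvGood (l : String) : Bool := decide (l ≠ "") && !(PySem.Str.endswith l ".pdf")

-- A's loop, flattened onto the plain stream of candidate links
def pvLoop (max_links : Int) (cands : List String)
    (seen : PySem.Set String) (links : List String) :
    Sum (PySem.Set String × List String) (List String) :=
  match cands with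
  | [] => Sum.inl (seen, links)
  | c :: rest =>
    if c ≠ "" ∧ PySem.Set.contains seen c = false ∧ PySem.Str.endswith c ".pdf" = false then
      let links2 := links ++ [c]
      if max_links ≤ (links2.length : Int) then Sum.inr links2
      else pvLoop max_links rest (PySem.Set.add seen c) links2
    else pvLoop max_links rest seen links

def pvLoopRes (max_links : Int) (cands : List String)
    (seen : PySem.Set String) (links : List String) : List String :=
  match pvLoop max_links cands seen links with
  | Sum.inl (_, l) => l
  | Sum.inr r => r

-- the fresh (good and not yet seen) links of a stream, in order
def pvFresh (seen : PySem.Set String) : List String → List String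
  | [] => []
  | c :: rest =>
    if pvGood c && !(PySem.Set.contains seen c) then c :: pvFresh (PySem.Set.add seen c) rest
    else pvFresh seen rest

theorem pvA_inner_eq_pvLoop (k : Int) (rows : List (List (String × String)))
    (seen : PySem.Set String) (links : List String) :
    pvA_inner k rows seen links
      = pvLoop k (rows.map (fun r => (PySem.Dict.mk r).getD "link" "")) seen links := by
  induction rows generalizing seen links with
  | nil => rfl
  | cons r rest ih =>
    simp only [pvA_inner, pvLoop, List.map_cons]
    split_ifs with h1 h2 <;> simp [ih]

theorem pvLoop_append (k : Int) (xs ys : List String)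
    (seen : PySem.Set String) (links : List String) :
    pvLoop k (xs ++ ys) seen links
      = match pvLoop k xs seen links with
        | Sum.inl (s, l) => pvLoop k ys s l
        | Sum.inr r => Sum.inr r := by
  induction xs generalizing seen links with
  | nil => rfl
  | cons c rest ih =>
    simp only [List.cons_append, pvLoop]
    split_ifs with h1 h2 <;> simp [ih]

theorem pvA_outer_eq_pvLoopRes (k : Int) (d : PySem.Dict Int (List (List (String × String))))
    (keys : List Int) (seen : PySem.Set String) (links : List String) :
    pvA_outer k d keys seen links
      = pvLoopRes k (keys.flatMap (fun i => (d.getD i []).map (fun r => (PySem.Dict.mk r).getD "link" ""))) seen links := by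
  induction keys generalizing seen links with
  | nil => rfl
  | cons i rest ih =>
    simp only [pvA_outer, List.flatMap_cons, pvLoopRes, pvLoop_append,
      pvA_inner_eq_pvLoop]
    cases h : pvLoop k ((d.getD i []).map (fun r => (PySem.Dict.mk r).getD "link" "")) seen links with
    | inl p => cases p with | mk s l => simpa [pvLoopRes, h] using ih s l
    | inr r => simp

theorem pvLoopRes_char (k : Int) (cands : List String) :
    ∀ (seen : PySem.Set String) (links : List String),
    pvLoopRes k cands seen links
      = links ++ (pvFresh seen cands).take (max (k - links.length) 1).toNat := by
  induction cands with
  | nil => intro seen links; simp [pvLoopRes, pvLoop, pvFresh]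
  | cons c rest ih =>
    intro seen links
    simp only [pvLoopRes, pvLoop, pvFresh]
    by_cases hg : c ≠ "" ∧ PySem.Set.contains seen c = false ∧ PySem.Str.endswith c ".pdf" = false
    · have hgood : (pvGood c && !(PySem.Set.contains seen c)) = true := by
        simp only [pvGood, Bool.and_eq_true, Bool.not_eq_true', decide_eq_true_eq]
        exact ⟨⟨hg.1, hg.2.2⟩, hg.2.1⟩
      rw [if_pos hg, hgood]
      simp only [if_true]
      by_cases hret : k ≤ ((links ++ [c]).length : Int)
      · rw [if_pos hret]
        have ht : (max (k - links.length) 1).toNat = 1 := by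
          simp only [List.length_append, List.length_cons, List.length_nil] at hret; omega
        simp [ht]
      · rw [if_neg hret]
        have hrec := ih (PySem.Set.add seen c) (links ++ [c])
        simp only [pvLoopRes] at hrec
        rw [hrec]
        have ht2 : (max (k - ((links ++ [c]).length : Int)) 1).toNat + 1 = (max (k - links.length) 1).toNat := by
          simp only [List.length_append, List.length_cons, List.length_nil] at hret ⊢
          omega
        rw [← ht2]
        simp [List.take_succ_cons]
    · have hgood : (pvGood c && !(PySem.Set.contains seen c)) = false := by
        cases hb : (pvGood c && !(PySem.Set.contains seen c)) with
        | false => rfl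
        | true =>
          exfalso; apply hg
          simp only [pvGood, Bool.and_eq_true, Bool.not_eq_true', decide_eq_true_eq] at hb
          exact ⟨hb.1.1, hb.2, hb.1.2⟩
      rw [if_neg hg, hgood]
      simp only [Bool.false_eq_true, if_false]
      exact ih seen links

-- B's ordered dedup of the good candidates is exactly pvFresh from the empty seen-set
theorem pvSet_update_filter (xs : List String) :
    ∀ (s : PySem.Set String),
    PySem.Set.update s (xs.filter pvGood) = s ++ pvFresh s xs := by
  induction xs with
  | nil => intro s; simp [pvFresh, PySem.Set.update]
  | cons c rest ih =>
    intro s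
    by_cases hg : pvGood c = true
    · by_cases hs : PySem.Set.contains s c = true
      · have hadd : PySem.Set.add s c = s := by
          unfold PySem.Set.add; rw [hs]; simp
        have hc : (pvGood c && !(PySem.Set.contains s c)) = false := by
          rw [hg, hs]; rfl
        rw [List.filter_cons, hg]
        simp only [if_true]
        rw [PySem.Set.update_cons, hadd, pvFresh, hc]
        simp only [Bool.false_eq_true, if_false]
        exact ih s
      · have hs' : PySem.Set.contains s c = false := by
          cases h : PySem.Set.contains s c with
          | false => rfl
          | true => exact absurd h hs
        have hadd : PySem.Set.add s c = s ++ [c] := by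
          unfold PySem.Set.add; rw [hs']; simp
        have hc : (pvGood c && !(PySem.Set.contains s c)) = true := by
          rw [hg, hs']; rfl
        rw [List.filter_cons, hg]
        simp only [if_true]
        rw [PySem.Set.update_cons, ih (PySem.Set.add s c), hadd, pvFresh, hc]
        simp only [if_true, List.append_assoc, List.singleton_append]
        rw [hadd]
    · have hg' : pvGood c = false := by
        cases h : pvGood c with
        | false => rfl
        | true => exact absurd h hg
      rw [List.filter_cons, hg']
      simp only [Bool.false_eq_true, if_false]
      rw [pvFresh, hg']
      simp only [Bool.false_and, Bool.false_eq_true, if_false]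
      exact ih s

theorem pvDedup_eq_pvFresh (xs : List String) :
    PySem.List.dedup (xs.filter pvGood) = pvFresh PySem.Set.empty xs := by
  have h := pvSet_update_filter xs PySem.Set.empty
  rw [PySem.List.dedup_eq_ofList, ← PySem.Set.update_nil_left]
  simpa [PySem.Set.empty] using h

-- characterisation of port A as take (max max_links 1) of B's dedup list
theorem pvA_char (all_results : List (Int × List (List (String × String)))) (k : Int) :
    collect_top_links_py all_results k
      = (PySem.List.dedup
          ((((PySem.List.sorted (PySem.Dict.mk all_results).keys (fun x => x) false).flatMap
              (fun i => ((PySem.Dict.mk all_results).getD i []).map (fun r => (PySem.Dict.mk r).getD "link" "")))).filter pvGood)).take (max k 1).toNat := by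
  rw [collect_top_links_py, pvDedup_eq_pvFresh]
  rw [pvA_outer_eq_pvLoopRes, pvLoopRes_char]
  simp

-- ---------- B-side lemmas ----------

-- first-occurrence index of a link in an indexed stream (0 when absent)
def pvFirstIdx (ps : List (Int × String)) (l : String) : Int :=
  ((ps.find? (fun q => q.2 == l)).map (fun q => q.1)).getD 0

theorem pvFirstIdx_cons_self (p : Int × String) (ps : List (Int × String)) :
    pvFirstIdx (p :: ps) p.2 = p.1 := by
  simp [pvFirstIdx, List.find?_cons]

theorem pvFirstIdx_cons_ne (p : Int × String) (ps : List (Int × String)) (l : String)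
    (h : l ≠ p.2) : pvFirstIdx (p :: ps) l = pvFirstIdx ps l := by
  have hb : (p.2 == l) = false := beq_eq_false_iff_ne.mpr (Ne.symm h)
  simp [pvFirstIdx, List.find?_cons, hb]

theorem pvFirstIdx_lt (p : Int × String) (rest : List (Int × String))
    (h : ∀ q ∈ rest, p.1 < q.1) (b : String) (hb : b ∈ rest.map (fun q => q.2)) :
    p.1 < pvFirstIdx rest b := by
  obtain ⟨q, hq, rfl⟩ := List.mem_map.mp hb
  cases hf : rest.find? (fun x => x.2 == q.2) with
  | none =>
    exfalso
    have := List.find?_eq_none.mp hf q hq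
    simp at this
  | some r =>
    have hr : r ∈ rest := List.mem_of_find?_eq_some hf
    simp [pvFirstIdx, hf]
    exact h r hr

-- a loop body that skips the bad links is the same fold over the pvGood-filtered list
theorem pvFoldlIteFilter (l : List (Int × String)) : ∀ (d : PySem.Dict String Int),
    l.foldl (fun f (p : Int × String) =>
        if p.2 ≠ "" ∧ PySem.Str.endswith p.2 ".pdf" = false then f.insert p.2 p.1 else f) d
      = (l.filter (fun p => pvGood p.2)).foldl (fun f (p : Int × String) => f.insert p.2 p.1) d := by
  induction l with
  | nil => intro d; rfl
  | cons x t ih =>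
    intro d
    rw [List.foldl_cons, List.filter_cons]
    by_cases hc : x.2 ≠ "" ∧ PySem.Str.endswith x.2 ".pdf" = false
    · have hg : pvGood x.2 = true := by
        simp only [pvGood, Bool.and_eq_true, Bool.not_eq_true', decide_eq_true_eq]
        exact ⟨hc.1, hc.2⟩
      rw [if_pos hc, hg]
      simp only [if_true, List.foldl_cons]
      exact ih _
    · have hg : pvGood x.2 = false := by
        cases hb : pvGood x.2 with
        | false => rfl
        | true =>
          exfalso; apply hc
          simp only [pvGood, Bool.and_eq_true, Bool.not_eq_true', decide_eq_true_eq] at hb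
          exact ⟨hb.1, hb.2⟩
      rw [if_neg hc, hg]
      simp only [Bool.false_eq_true, if_false]
      exact ih d

-- value of the reverse-overwrite fold: the FIRST matching pair wins
theorem pvGetRevFold (ps : List (Int × String)) (d0 : PySem.Dict String Int) (l : String) :
    (ps.reverse.foldl (fun f (p : Int × String) => f.insert p.2 p.1) d0).get? l
      = (match ps.find? (fun q => q.2 == l) with
         | some q => some q.1
         | none => d0.get? l) := by
  induction ps with
  | nil => rfl
  | cons q t ih =>
    rw [List.reverse_cons, List.foldl_append]
    simp only [List.foldl_cons, List.foldl_nil]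
    rw [PySem.Dict.get?_insert]
    by_cases h : l = q.2
    · have hb : (q.2 == l) = true := beq_iff_eq.mpr h.symm
      simp [List.find?_cons, hb, h]
    · have hb : (q.2 == l) = false := beq_eq_false_iff_ne.mpr (Ne.symm h)
      rw [if_neg h, ih]
      simp [List.find?_cons, hb]

-- the sort key of port B is pvFirstIdx
theorem pvKeyFun (ps : List (Int × String)) :
    (fun l => (((ps.reverse.foldl (fun f (p : Int × String) => f.insert p.2 p.1)
        (PySem.Dict.empty : PySem.Dict String Int)).get? l).getD 0)) = pvFirstIdx ps := by
  funext l
  rw [pvGetRevFold]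
  cases h : ps.find? (fun q => q.2 == l) with
  | none => simp [pvFirstIdx, h, PySem.Dict.empty, PySem.Dict.get?]
  | some q => simp [pvFirstIdx, h]

-- links of the dedup list come in strictly increasing first-occurrence order
theorem pvPairwise (ps : List (Int × String)) (hps : ps.Pairwise (fun p q => p.1 < q.1)) :
    (PySem.List.dedup (ps.map (fun p => p.2))).Pairwise
      (fun a b => pvFirstIdx ps a < pvFirstIdx ps b) := by
  induction ps with
  | nil => simp [PySem.List.dedup_eq_ofList, PySem.Set.ofList_nil]
  | cons p rest ih =>
    rw [List.pairwise_cons] at hps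
    obtain ⟨hhead, htail⟩ := hps
    rw [List.map_cons, PySem.List.dedup_eq_ofList, PySem.Set.ofList_cons]
    rw [List.pairwise_cons]
    constructor
    · intro b hb
      have hb' : b ∈ PySem.Set.ofList (rest.map (fun p => p.2)) ∧ ¬ b = p.2 := by
        simpa [PySem.Set.discard, List.mem_filter] using hb
      have hbm : b ∈ rest.map (fun q => q.2) := by
        simpa [PySem.Set.mem_ofList] using hb'.1
      rw [pvFirstIdx_cons_self, pvFirstIdx_cons_ne _ _ _ hb'.2]
      exact pvFirstIdx_lt p rest hhead b hbm
    · have ihp := ih htail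
      rw [PySem.List.dedup_eq_ofList] at ihp
      have hf := List.Pairwise.filter (fun y => !(y == p.2)) ihp
      refine hf.imp_of_mem ?_
      intro a b ha hb hab
      have ha2 : ¬ a = p.2 := by
        have := (List.mem_filter.mp ha).2; simpa using this
      have hb2 : ¬ b = p.2 := by
        have := (List.mem_filter.mp hb).2; simpa using this
      rw [pvFirstIdx_cons_ne _ _ _ ha2, pvFirstIdx_cons_ne _ _ _ hb2]
      exact hab

-- dropping the indices of the filtered enumeration gives the filtered stream
theorem pvMapSndFilter (xs : List String) : ∀ (s : Int),
    (((PySem.List.enumerate xs s).filter (fun p => pvGood p.2)).map (fun p => p.2))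
      = xs.filter pvGood := by
  induction xs with
  | nil => intro s; simp [PySem.List.enumerate_nil]
  | cons x t ih =>
    intro s
    rw [PySem.List.enumerate_cons]
    by_cases h : pvGood x = true <;> simp [List.filter_cons, h, ih]

-- sorting the distinct links by first-occurrence index IS the ordered dedup
theorem pvOrderedEq (ps : List (Int × String)) (hps : ps.Pairwise (fun p q => p.1 < q.1)) :
    PySem.List.sorted
      ((ps.reverse.foldl (fun f (p : Int × String) => f.insert p.2 p.1)
          (PySem.Dict.empty : PySem.Dict String Int)).keys)
      (fun l => (((ps.reverse.foldl (fun f (p : Int × String) => f.insert p.2 p.1)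
          (PySem.Dict.empty : PySem.Dict String Int)).get? l).getD 0)) false
      = PySem.List.dedup (ps.map (fun p => p.2)) := by
  have hk : ((ps.reverse.foldl (fun f (p : Int × String) => f.insert p.2 p.1)
      (PySem.Dict.empty : PySem.Dict String Int)).keys)
      = PySem.Set.ofList (ps.reverse.map (fun p => p.2)) := by
    have h := PySem.Dict.keys_foldl_insert_key (ν := Int) ps.reverse
      (fun p : Int × String => p.2) (fun _ p => p.1) PySem.Dict.empty
    simpa [PySem.Dict.empty, PySem.Dict.keys, PySem.Set.update_nil_left] using h
  rw [hk, pvKeyFun]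
  apply PySem.List.sorted_eq_of_perm_of_pairwise_lt
  · rw [List.perm_ext_iff_of_nodup (PySem.List.nodup_dedup _) (PySem.Set.nodup_ofList _)]
    intro a
    simp [PySem.List.mem_dedup, PySem.Set.mem_ofList, List.mem_reverse]
  · exact pvPairwise ps hps

-- characterisation of port B as take (max max_links 0) of the dedup list
theorem pvB_char (all_results : List (Int × List (List (String × String)))) (k : Int) :
    collect_top_links_py_alt all_results k
      = (PySem.List.dedup
          ((((PySem.List.sorted (PySem.Dict.mk all_results).keys (fun x => x) false).flatMap
              (fun i => ((PySem.Dict.mk all_results).getD i []).map (fun r => (PySem.Dict.mk r).getD "link" "")))).filter pvGood)).take (max k 0).toNat := by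
  rw [collect_top_links_py_alt]
  rw [pvFoldlIteFilter, List.filter_reverse]
  rw [pvOrderedEq _ (List.Pairwise.filter _ (PySem.List.pairwise_lt_enumerate _ 0))]
  rw [pvMapSndFilter]
  by_cases hk : 0 < k
  · rw [if_pos hk, PySem.List.slice_to _ (by omega)]
    congr 1
    omega
  · rw [if_neg hk, PySem.List.slice_to _ (by omega)]
    congr 1
    omega

-- the PySem dict over a literal association list looks up like List.lookup
theorem pvGet?_eq_lookup {κ ν : Type} [BEq κ] [LawfulBEq κ] (l : List (κ × ν)) (k : κ) :
    (PySem.Dict.mk l).get? k = l.lookup k := by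
  induction l with
  | nil => rfl
  | cons p rest ih =>
    obtain ⟨a, b⟩ := p
    rw [PySem.Dict.get?_mk_cons]
    by_cases h : a = k
    · subst h
      simp [List.lookup]
    · have h1 : (a == k) = false := beq_eq_false_iff_ne.mpr h
      have h2 : (k == a) = false := beq_eq_false_iff_ne.mpr (Ne.symm h)
      rw [h1]
      simp only [Bool.false_eq_true, if_false]
      simp [List.lookup, h2, ih]

theorem pvGetD_eq_lookup {κ ν : Type} [BEq κ] [LawfulBEq κ] (l : List (κ × ν)) (k : κ) (dflt : ν) :
    (PySem.Dict.mk l).getD k dflt = (l.lookup k).getD dflt := by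
  rw [PySem.Dict.getD_eq_get?_getD, pvGet?_eq_lookup]

-- the link drawn from a row r of the D_ witness is a good candidate of the stream
theorem pvD_good_mem (all_results : List (Int × List (List (String × String))))
    (hex : ∃ p ∈ all_results, ∃ r ∈ (all_results.lookup p.1).getD [], ∃ l,
      r.lookup "link" = some l ∧ l ≠ "" ∧ ¬ ".pdf".toList <:+ l.toList) :
    ∃ x ∈ (((PySem.List.sorted (PySem.Dict.mk all_results).keys (fun x => x) false).flatMap
        (fun i => ((PySem.Dict.mk all_results).getD i []).map (fun r => (PySem.Dict.mk r).getD "link" "")))).filter pvGood, True := by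
  obtain ⟨p, hp, r, hr, l, hlook, hne, hsuf⟩ := hex
  refine ⟨(PySem.Dict.mk r).getD "link" "", ?_, trivial⟩
  have hx : (PySem.Dict.mk r).getD "link" "" = l := by
    rw [pvGetD_eq_lookup, hlook]; rfl
  apply List.mem_filter.mpr
  constructor
  · apply List.mem_flatMap.mpr
    refine ⟨p.1, ?_, ?_⟩
    · rw [PySem.List.mem_sorted]
      have : (PySem.Dict.mk all_results).keys = all_results.map Prod.fst := rfl
      rw [this]
      exact List.mem_map.mpr ⟨p, hp, rfl⟩
    · apply List.mem_map.mpr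
      refine ⟨r, ?_, rfl⟩
      rw [pvGetD_eq_lookup]
      exact hr
  · rw [hx]
    simp only [pvGood, Bool.and_eq_true, Bool.not_eq_true', decide_eq_true_eq]
    refine ⟨hne, ?_⟩
    cases he : PySem.Str.endswith l ".pdf" with
    | false => rfl
    | true =>
      exfalso; apply hsuf
      simp only [PySem.Str.endswith, PySem.Chars.endswith, List.isSuffixOf_iff_suffix] at he
      exact he

-- ===== VERDICT (by name: the statement is the Claim_ definition above) =====
theorem collect_top_links_py_spec : Claim_unchanged_collect_top_links_py := by
  intro all_results k _
  unfold Spec_collect_top_links_py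
  intro hD
  rw [pvA_char, pvB_char]
  by_cases hk : 1 ≤ k
  · have : max k 1 = max k 0 := by omega
    rw [this]
  · have hkle : k ≤ 0 := by omega
    have hnil :
        (((PySem.List.sorted (PySem.Dict.mk all_results).keys (fun x => x) false).flatMap
            (fun i => ((PySem.Dict.mk all_results).getD i []).map
              (fun r => (PySem.Dict.mk r).getD "link" ""))).filter pvGood) = [] := by
      apply List.filter_eq_nil_iff.mpr
      intro x hx
      simp only [List.mem_flatMap, List.mem_map, PySem.List.mem_sorted] at hx
      obtain ⟨i, hi, r, hr, hxr⟩ := hx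
      intro hgx
      apply hD
      refine ⟨hkle, ?_⟩
      have hkeys : (PySem.Dict.mk all_results).keys = all_results.map Prod.fst := rfl
      rw [hkeys] at hi
      obtain ⟨p, hp, hpi⟩ := List.mem_map.mp hi
      rw [pvGetD_eq_lookup] at hr
      refine ⟨p, hp, r, by rw [hpi]; exact hr, (r.lookup "link").getD "", ?_, ?_, ?_⟩
      · subst hxr
        rw [pvGetD_eq_lookup] at hgx
        cases hc : r.lookup "link" with
        | none =>
          exfalso
          rw [hc] at hgx
          simp [pvGood] at hgx
        | some l => simp
      · subst hxr
        rw [pvGetD_eq_lookup] at hgx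
        simp only [pvGood, Bool.and_eq_true, decide_eq_true_eq] at hgx
        exact hgx.1
      · subst hxr
        rw [pvGetD_eq_lookup] at hgx
        simp only [pvGood, Bool.and_eq_true, Bool.not_eq_true', decide_eq_true_eq] at hgx
        intro hsuf
        have : PySem.Str.endswith ((r.lookup "link").getD "") ".pdf" = true := by
          simp only [PySem.Str.endswith, PySem.Chars.endswith, List.isSuffixOf_iff_suffix]
          exact hsuf
        rw [hgx.2] at this
        exact Bool.false_ne_true this
    rw [hnil]
    simp

theorem collect_top_links_py_changed : Claim_changed_collect_top_links_py := by
  unfold Claim_changed_collect_top_links_py; decide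

theorem collect_top_links_py_tight : Claim_exact_collect_top_links_py := by
  intro all_results k _ hD
  obtain ⟨hkle, hex⟩ := hD
  rw [pvA_char, pvB_char]
  have hmax1 : max k 1 = 1 := by omega
  have hmax0 : max k 0 = 0 := by omega
  rw [hmax1, hmax0]
  obtain ⟨x, hx, -⟩ := pvD_good_mem all_results hex
  have hxd : x ∈ PySem.List.dedup
      ((((PySem.List.sorted (PySem.Dict.mk all_results).keys (fun x => x) false).flatMap
          (fun i => ((PySem.Dict.mk all_results).getD i []).map (fun r => (PySem.Dict.mk r).getD "link" "")))).filter pvGood) := by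
    rw [PySem.List.mem_dedup]
    exact hx
  intro heq
  cases hU : PySem.List.dedup
      ((((PySem.List.sorted (PySem.Dict.mk all_results).keys (fun x => x) false).flatMap
          (fun i => ((PySem.Dict.mk all_results).getD i []).map (fun r => (PySem.Dict.mk r).getD "link" "")))).filter pvGood) with
  | nil => rw [hU] at hxd; exact List.not_mem_nil hxd
  | cons y ys =>
    rw [hU] at heq
    simp at heq
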